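-- pv_equiv track=rewrite | github.com/raeez/chiral-bar-cobar | compute/lib/koszul_hilbert.py | virasoro_bar_cohomology
-- ===== SOURCE A (Python) =====
-- from typing import List, Tuple, Optional, Dict
--
-- def motzkin(n: int) -> int:
--     """Motzkin number M(n)."""
--     if n <= 0:
--         return 1
--     if n == 1:
--         return 1
--     M = [1, 1]
--     for k in range(2, n + 1):
--         num = (2*k + 1) * M[k-1] + 3 * (k-1) * M[k-2]
--         assert num % (k + 2) == 0, f"Motzkin recurrence: {num} not divisible by {k+2} at k={k}"
--         M.append(num // (k + 2))
--     return M[n]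
--
-- def virasoro_bar_cohomology(max_degree: int) -> List[int]:
--     """Known Virasoro bar cohomology = Motzkin differences M(n+1)-M(n)."""
--     result = []
--     for n in range(max_degree + 1):
--         if n == 0:
--             result.append(1)  # vacuum
--         else:
--             result.append(motzkin(n + 1) - motzkin(n))
--     return result
-- ===== SOURCE B (Python) =====
-- def virasoro_bar_cohomology(max_degree: int) -> list:
--     """Known Virasoro bar cohomology = Motzkin differences M(n+1)-M(n).
--     Computes the Motzkin sequence once in a single pass and takes
--     consecutive differences (O(n) arithmetic ops vs A's O(n^2))."""
--     if max_degree < 0: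
--         return []
--     M = [1, 1]  # M(0), M(1)
--     for k in range(2, max_degree + 2):
--         M.append(((2 * k + 1) * M[k - 1] + 3 * (k - 1) * M[k - 2]) // (k + 2))
--     return [1] + [M[n + 1] - M[n] for n in range(1, max_degree + 1)]
-- ===== Notes on version B (the rewrite author's own statement) =====
-- stated objective: faster
-- what changed: B computes the Motzkin table once with a single pass of the recurrence and takes consecutive differences, instead of A's re-running the full Motzkin recurrence from scratch for every degree n.
import Mathlib
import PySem

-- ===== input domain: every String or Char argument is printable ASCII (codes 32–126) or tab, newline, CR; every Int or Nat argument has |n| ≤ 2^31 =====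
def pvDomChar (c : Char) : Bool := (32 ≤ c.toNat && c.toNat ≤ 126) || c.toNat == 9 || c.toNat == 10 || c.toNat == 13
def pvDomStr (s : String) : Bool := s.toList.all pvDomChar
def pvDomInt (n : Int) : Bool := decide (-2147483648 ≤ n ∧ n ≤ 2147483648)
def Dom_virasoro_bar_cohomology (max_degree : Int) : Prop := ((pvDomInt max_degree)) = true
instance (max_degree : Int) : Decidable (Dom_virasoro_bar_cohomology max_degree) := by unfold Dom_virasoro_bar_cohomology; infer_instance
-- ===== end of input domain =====

-- B replaces A's per-degree recomputation of the Motzkin recurrence by one pass over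
-- the recurrence followed by consecutive differences (objective: faster).

-- ===== PORT A =====
-- loop body of the Motzkin recurrence, shared verbatim by both Pythons:
-- M.append(((2k+1)*M[k-1] + 3(k-1)*M[k-2]) // (k+2)).  Indices are always in range
-- and the assert (divisibility) never fires in Python, so it is not modelled.
def mstep (M : List Int) (k : Int) : List Int :=
  M ++ [PySem.Int.floordiv ((2*k + 1) * PySem.List.pyGetD M (k-1) 0
          + 3*(k-1) * PySem.List.pyGetD M (k-2) 0) (k + 2)]

def motzkin (n : Int) : Int :=
  if n ≤ 0 then 1
  else if n = 1 then 1
  else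
    let M := (PySem.List.pyRange 2 (n+1) 1).foldl mstep [1, 1]
    PySem.List.pyGetD M n 0

def virasoro_bar_cohomology (max_degree : Int) : List Int :=
  (PySem.List.pyRange 0 (max_degree + 1) 1).foldl
    (fun result n => result ++ [if n = 0 then 1 else motzkin (n+1) - motzkin n]) []

-- ===== PORT B =====
def virasoro_bar_cohomology_alt (max_degree : Int) : List Int :=
  if max_degree < 0 then []
  else
    let M := (PySem.List.pyRange 2 (max_degree + 2) 1).foldl mstep [1, 1]
    [1] ++ (PySem.List.pyRange 1 (max_degree + 1) 1).map
      (fun n => PySem.List.pyGetD M (n+1) 0 - PySem.List.pyGetD M n 0)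

-- ===== PRECONDITION & SPEC =====
def Spec_virasoro_bar_cohomology (max_degree : Int) (out : List Int) : Prop := out = virasoro_bar_cohomology_alt max_degree
instance (max_degree : Int) (out : List Int) : Decidable (Spec_virasoro_bar_cohomology max_degree out) := by unfold Spec_virasoro_bar_cohomology; infer_instance

-- ===== CLAIM (what is proved, stated in full; the proofs are below) =====
def Claim_equal_virasoro_bar_cohomology : Prop := ∀ (max_degree : Int), Dom_virasoro_bar_cohomology max_degree → Spec_virasoro_bar_cohomology max_degree (virasoro_bar_cohomology max_degree)

-- ===== LEMMAS AND PROOFS =====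

-- the Motzkin table [M(0), …, M(m+1)] as computed by the shared loop
def mtab (m : Nat) : List Int := (PySem.List.pyRange 2 (2 + m) 1).foldl mstep [1, 1]

theorem mtab_zero : mtab 0 = [1, 1] := by
  simp [mtab, PySem.List.pyRange_one_eq_nil]

theorem mtab_succ (m : Nat) : mtab (m + 1) = mstep (mtab m) (2 + m) := by
  unfold mtab
  push_cast
  rw [show ((2 : Int) + ((m : Int) + 1)) = (2 + (m : Int)) + 1 by ring,
      PySem.List.pyRange_one_succ_right (by omega), List.foldl_append]
  simp

theorem mtab_length (m : Nat) : (mtab m).length = m + 2 := by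
  induction m with
  | zero => simp [mtab_zero]
  | succ m ih => simp [mtab_succ, mstep, ih]

theorem mtab_prefix (m j : Nat) : mtab m <+: mtab (m + j) := by
  induction j with
  | zero => exact List.prefix_rfl
  | succ j ih =>
      refine ih.trans ?_
      rw [show m + (j+1) = (m + j) + 1 by ring, mtab_succ]
      exact ⟨_, rfl⟩

theorem mtab_getD_stable (m m' i : Nat) (hm : m ≤ m') (hi : i < m + 2) :
    (mtab m').getD i 0 = (mtab m).getD i 0 := by
  obtain ⟨j, rfl⟩ := Nat.exists_eq_add_of_le hm
  have hpre := mtab_prefix m j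
  have hi' : i < (mtab m).length := by rw [mtab_length]; omega
  have hi'' : i < (mtab (m + j)).length := by rw [mtab_length]; omega
  rw [List.getD_eq_getElem _ _ hi', List.getD_eq_getElem _ _ hi'']
  exact (List.IsPrefix.getElem hpre hi').symm

-- A's motzkin n equals the lookup in any sufficiently long table
theorem motzkin_eq_mtab (n : Int) (m : Nat) (h0 : 0 ≤ n) (h1 : n ≤ (m : Int) + 1) :
    motzkin n = (mtab m).getD n.toNat 0 := by
  by_cases hn0 : n ≤ 0
  · have : n = 0 := le_antisymm hn0 h0
    subst this
    rw [motzkin, if_pos le_rfl, show Int.toNat 0 = 0 from rfl,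
        mtab_getD_stable 0 m 0 (Nat.zero_le m) (by omega), mtab_zero]
    rfl
  · by_cases hn1 : n = 1
    · subst hn1
      rw [motzkin, if_neg hn0, if_pos rfl, show Int.toNat 1 = 1 from rfl,
          mtab_getD_stable 0 m 1 (Nat.zero_le m) (by omega), mtab_zero]
      rfl
    · have h2 : 2 ≤ n := by omega
      rw [motzkin, if_neg hn0, if_neg hn1]
      have htab : (PySem.List.pyRange 2 (n+1) 1).foldl mstep [1, 1] = mtab (n.toNat - 1) := by
        unfold mtab
        congr 1
        congr 1
        omega
      simp only [htab]
      have hlen : n < ((mtab (n.toNat - 1)).length : Int) := by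
        rw [mtab_length]; omega
      rw [PySem.List.pyGetD_eq_getElem _ _ h0 hlen,
          mtab_getD_stable (n.toNat - 1) m n.toNat (by omega) (by omega),
          List.getD_eq_getElem _ _ (by rw [mtab_length]; omega)]

-- A's fold builds the same list as a map
theorem foldA (d : Int) :
    virasoro_bar_cohomology d
      = (PySem.List.pyRange 0 (d + 1) 1).map
          (fun n => if n = 0 then 1 else motzkin (n+1) - motzkin n) := by
  unfold virasoro_bar_cohomology
  rw [PySem.List.foldl_append_singleton_eq_map]
  simp

theorem virasoro_bar_cohomology_spec' (d : Int) :
    virasoro_bar_cohomology d = virasoro_bar_cohomology_alt d := by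
  by_cases hd : d < 0
  · rw [foldA, virasoro_bar_cohomology_alt, if_pos hd,
        PySem.List.pyRange_one_eq_nil (by omega)]
    rfl
  · push Not at hd
    rw [foldA, virasoro_bar_cohomology_alt, if_neg (by omega)]
    have htab : (PySem.List.pyRange 2 (d + 2) 1).foldl mstep [1, 1] = mtab d.toNat := by
      unfold mtab; congr 2; omega
    simp only [htab]
    rw [PySem.List.pyRange_one_cons (by omega : (0:Int) < d + 1)]
    simp only [List.map_cons, zero_add]
    congr 1
    apply List.map_congr_left
    intro n hn
    rw [PySem.List.mem_pyRange_one] at hn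
    have hn1 : (1:Int) ≤ n := hn.1
    have hn2 : n < d + 1 := hn.2
    rw [if_neg (by omega)]
    have hA : motzkin (n + 1) = (mtab d.toNat).getD (n+1).toNat 0 :=
      motzkin_eq_mtab (n+1) d.toNat (by omega) (by omega)
    have hB : motzkin n = (mtab d.toNat).getD n.toNat 0 :=
      motzkin_eq_mtab n d.toNat (by omega) (by omega)
    rw [hA, hB,
        PySem.List.pyGetD_eq_getElem _ _ (by omega : (0:Int) ≤ n + 1)
          (by rw [mtab_length]; push_cast; omega),
        PySem.List.pyGetD_eq_getElem _ _ (by omega : (0:Int) ≤ n)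
          (by rw [mtab_length]; push_cast; omega),
        List.getD_eq_getElem _ _ (by rw [mtab_length]; omega),
        List.getD_eq_getElem _ _ (by rw [mtab_length]; omega)]

-- ===== VERDICT (by name: the statement is the Claim_ definition above) =====
theorem virasoro_bar_cohomology_spec : Claim_equal_virasoro_bar_cohomology := by
  intro d _
  exact virasoro_bar_cohomology_spec' d
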